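-- pv_equiv track=rewrite | github.com/VishwamAI/Generative-Flex | fix_docstring_patterns_v2.py | fix_class_docstring
-- ===== SOURCE A (Python) =====
-- def fix_class_docstring(content):
--     """Fix class-level docstring formatting."""
--     lines = content.split('\n')
--     fixed_lines = []
--     in_class = False
--     class_indent = ''
--     in_docstring = False
--
--     for i, line in enumerate(lines):
--         stripped = line.strip()
--
--         # Handle class definition
--         if stripped.startswith('class ') and stripped.endswith(':'):
--             in_class = True
--             class_indent = line[:line.index('class')]
--             class_name = stripped[6:-1]
--             fixed_lines.append(line)
--             # Add or fix class docstring
--             next_line = lines[i+1].strip() if i+1 < len(lines) else ''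
--             if not next_line.startswith('"""'):
--                 fixed_lines.append(f'{class_indent}    """')
--                 fixed_lines.append(f'{class_indent}    Class implementing {class_name} functionality.')
--                 fixed_lines.append(f'{class_indent}    """')
--             continue
--
--         # Handle existing class docstring
--         if in_class and stripped.startswith('"""') and not in_docstring:
--             in_docstring = True
--             fixed_lines.append(f'{class_indent}    """')
--             if stripped != '"""':
--                 content = stripped[3:-3].strip() if stripped.endswith('"""') else stripped[3:].strip()
--                 fixed_lines.append(f'{class_indent}    {content}')
--                 if stripped.endswith('"""'):
--                     fixed_lines.append(f'{class_indent}    """')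
--                     in_docstring = False
--             continue
--
--         # Handle docstring content
--         if in_class and in_docstring:
--             if stripped.endswith('"""'):
--                 if stripped != '"""':
--                     fixed_lines.append(f'{class_indent}    {stripped[:-3].strip()}')
--                 fixed_lines.append(f'{class_indent}    """')
--                 in_docstring = False
--             elif stripped:
--                 fixed_lines.append(f'{class_indent}    {stripped}')
--             else:
--                 fixed_lines.append('')
--             continue
--
--         # Handle method docstring
--         if in_class and stripped.startswith('def '):
--             method_indent = class_indent + '    '
--             fixed_lines.append(line)
--             next_line = lines[i+1].strip() if i+1 < len(lines) else ''
--             if not next_line.startswith('"""'):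
--                 method_name = stripped[4:stripped.index('(')]
--                 fixed_lines.append(f'{method_indent}    """')
--                 fixed_lines.append(f'{method_indent}    Method implementing {method_name} functionality.')
--                 fixed_lines.append(f'{method_indent}    """')
--             continue
--
--         fixed_lines.append(line)
--
--     return '\n'.join(fixed_lines)
-- ===== SOURCE B (Python) =====
-- def fix_class_docstring(content):
--     """Fix class-level docstring formatting (index loop with a docstring-block consumer)."""
--     lines = content.split('\n')
--     out = []
--     in_class = False
--     indent = ''
--     n = len(lines)
--     i = 0
--     while i < n:
--         line = lines[i]
--         s = line.strip()
--         if s.startswith('class ') and s.endswith(':'):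
--             in_class = True
--             indent = line[:line.index('class')]
--             out.append(line)
--             nxt = lines[i + 1].strip() if i + 1 < n else ''
--             if not nxt.startswith('"""'):
--                 out.append(indent + '    """')
--                 out.append(indent + '    Class implementing ' + s[6:-1] + ' functionality.')
--                 out.append(indent + '    """')
--         elif in_class and s.startswith('"""'):
--             out.append(indent + '    """')
--             if s != '"""' and s.endswith('"""'):
--                 out.append(indent + '    ' + s[3:-3].strip())
--                 out.append(indent + '    """')
--             else:
--                 if s != '"""':
--                     out.append(indent + '    ' + s[3:].strip())
--                 # consume the docstring block until its closing quotes
--                 i += 1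
--                 while i < n:
--                     t = lines[i].strip()
--                     if t.endswith('"""'):
--                         if t != '"""':
--                             out.append(indent + '    ' + t[:-3].strip())
--                         out.append(indent + '    """')
--                         break
--                     out.append(indent + '    ' + t if t else '')
--                     i += 1
--         elif in_class and s.startswith('def '):
--             out.append(line)
--             nxt = lines[i + 1].strip() if i + 1 < n else ''
--             if not nxt.startswith('"""'):
--                 mi = indent + '    '
--                 out.append(mi + '    """')
--                 out.append(mi + '    Method implementing ' + s[4:s.index('(')] + ' functionality.')
--                 out.append(mi + '    """')
--         else:
--             out.append(line)
--         i += 1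
--     return '\n'.join(out)
-- ===== Notes on version B (the rewrite author's own statement) =====
-- stated objective: alternative
-- what changed: Replaced A's flag-based for loop (in_docstring state threaded through every line) by an index while-loop that, on a multi-line docstring opener, consumes the whole docstring block in an inner loop; Pre_ excludes inputs where a class-header line occurs inside an open class docstring (A restarts class handling mid-docstring, B keeps it as docstring text; both readings of that ambiguous corner are defensible) and inputs where a class-level method-definition line lacks an opening parenthesis, on which both A and B raise ValueError.
import Mathlib
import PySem

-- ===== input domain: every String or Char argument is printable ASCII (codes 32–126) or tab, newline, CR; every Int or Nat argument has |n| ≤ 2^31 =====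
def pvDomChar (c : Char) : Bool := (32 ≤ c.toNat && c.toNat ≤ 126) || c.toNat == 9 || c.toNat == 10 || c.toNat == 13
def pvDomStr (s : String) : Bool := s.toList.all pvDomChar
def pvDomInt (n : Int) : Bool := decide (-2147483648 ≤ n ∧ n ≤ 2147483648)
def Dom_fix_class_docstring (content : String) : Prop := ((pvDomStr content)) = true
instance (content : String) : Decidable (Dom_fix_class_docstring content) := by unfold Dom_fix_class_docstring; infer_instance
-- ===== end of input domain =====

-- B rewrites A's flag-based for loop as an index while-loop whose docstring blocks are
-- consumed by an inner loop; no speed claim.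

-- ===== PORT A =====
-- A's for loop with state (fixed_lines, in_class, class_indent, in_docstring); the lookahead
-- lines[i+1] is the head of the remaining list.  line.index('class') is ported with
-- PySem.Str.find (exact: 'class' occurs since stripped startswith 'class '); stripped.index('(')
-- likewise (Pre_ excludes the inputs where '(' is absent and Python raises ValueError).
def pvA_go (ls : List String) (inClass : Bool) (ci : String) (inDoc : Bool)
    (acc : List String) : List String :=
  match ls with
  | [] => acc
  | line :: rest =>
    let s := PySem.Str.strip line
    if PySem.Str.startswith s "class " && PySem.Str.endswith s ":" then
      let ci' := PySem.Str.slice line none (some (PySem.Str.find line "class"))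
      let name := PySem.Str.slice s (some 6) (some (-1))
      let nxt := PySem.Str.strip (rest.headD "")
      let acc := acc ++ [line]
      let acc := if !(PySem.Str.startswith nxt "\"\"\"") then
          acc ++ [ci' ++ "    \"\"\"",
                  ci' ++ "    Class implementing " ++ name ++ " functionality.",
                  ci' ++ "    \"\"\""]
        else acc
      pvA_go rest true ci' inDoc acc
    else if inClass && PySem.Str.startswith s "\"\"\"" && !inDoc then
      let acc := acc ++ [ci ++ "    \"\"\""]
      if s ≠ "\"\"\"" then
        let c := if PySem.Str.endswith s "\"\"\"" then
            PySem.Str.strip (PySem.Str.slice s (some 3) (some (-3)))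
          else PySem.Str.strip (PySem.Str.slice s (some 3) none)
        let acc := acc ++ [ci ++ "    " ++ c]
        if PySem.Str.endswith s "\"\"\"" then
          pvA_go rest inClass ci false (acc ++ [ci ++ "    \"\"\""])
        else pvA_go rest inClass ci true acc
      else pvA_go rest inClass ci true acc
    else if inClass && inDoc then
      if PySem.Str.endswith s "\"\"\"" then
        let acc := if s ≠ "\"\"\"" then
            acc ++ [ci ++ "    " ++ PySem.Str.strip (PySem.Str.slice s none (some (-3)))]
          else acc
        pvA_go rest inClass ci false (acc ++ [ci ++ "    \"\"\""])
      else if s ≠ "" then pvA_go rest inClass ci inDoc (acc ++ [ci ++ "    " ++ s])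
      else pvA_go rest inClass ci inDoc (acc ++ [""])
    else if inClass && PySem.Str.startswith s "def " then
      let mi := ci ++ "    "
      let acc := acc ++ [line]
      let nxt := PySem.Str.strip (rest.headD "")
      let acc := if !(PySem.Str.startswith nxt "\"\"\"") then
          acc ++ [mi ++ "    \"\"\"",
                  mi ++ "    Method implementing " ++
                    PySem.Str.slice s (some 4) (some (PySem.Str.find s "(")) ++ " functionality.",
                  mi ++ "    \"\"\""]
        else acc
      pvA_go rest inClass ci inDoc acc
    else pvA_go rest inClass ci inDoc (acc ++ [line])

def fix_class_docstring (content : String) : String :=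
  PySem.Str.join "\n" (pvA_go (((PySem.Str.split? content "\n").getD [])) false "" false [])

-- ===== PORT B =====
-- inner loop consuming a docstring block up to its closing quotes; returns (remaining lines, out)
def pvB_doc (ls : List String) (ci : String) (out : List String) :
    List String × List String :=
  match ls with
  | [] => ([], out)
  | l :: rest =>
    let t := PySem.Str.strip l
    if PySem.Str.endswith t "\"\"\"" then
      (rest,
        (if t ≠ "\"\"\"" then
            out ++ [ci ++ "    " ++ PySem.Str.strip (PySem.Str.slice t none (some (-3)))]
          else out) ++ [ci ++ "    \"\"\""])
    else if t ≠ "" then pvB_doc rest ci (out ++ [ci ++ "    " ++ t])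
    else pvB_doc rest ci (out ++ [""])

-- the inner loop never moves forward past its input (needed for pvB_go's termination)
theorem pvB_doc_len (ls : List String) (ci : String) (out : List String) :
    (pvB_doc ls ci out).1.length ≤ ls.length := by
  induction ls generalizing out with
  | nil => simp [pvB_doc]
  | cons l rest ih =>
    simp only [pvB_doc]
    split_ifs <;> simp <;> exact le_trans (ih _) (Nat.le_succ _)

-- outer index loop; no in_docstring flag
def pvB_go (ls : List String) (inClass : Bool) (ci : String) (out : List String) :
    List String :=
  match ls with
  | [] => out
  | l :: rest =>
    let s := PySem.Str.strip l
    if PySem.Str.startswith s "class " && PySem.Str.endswith s ":" then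
      let ci' := PySem.Str.slice l none (some (PySem.Str.find l "class"))
      let out := out ++ [l]
      let out := if !(PySem.Str.startswith (PySem.Str.strip (rest.headD "")) "\"\"\"") then
          out ++ [ci' ++ "    \"\"\"",
                  ci' ++ "    Class implementing " ++
                    PySem.Str.slice s (some 6) (some (-1)) ++ " functionality.",
                  ci' ++ "    \"\"\""]
        else out
      pvB_go rest true ci' out
    else if inClass && PySem.Str.startswith s "\"\"\"" then
      let out := out ++ [ci ++ "    \"\"\""]
      if s ≠ "\"\"\"" && PySem.Str.endswith s "\"\"\"" then
        pvB_go rest inClass ci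
          (out ++ [ci ++ "    " ++ PySem.Str.strip (PySem.Str.slice s (some 3) (some (-3))),
                   ci ++ "    \"\"\""])
      else
        let out := if s ≠ "\"\"\"" then
            out ++ [ci ++ "    " ++ PySem.Str.strip (PySem.Str.slice s (some 3) none)]
          else out
        let p := pvB_doc rest ci out
        pvB_go p.1 inClass ci p.2
    else if inClass && PySem.Str.startswith s "def " then
      let out := out ++ [l]
      let out := if !(PySem.Str.startswith (PySem.Str.strip (rest.headD "")) "\"\"\"") then
          let mi := ci ++ "    "
          out ++ [mi ++ "    \"\"\"",
                  mi ++ "    Method implementing " ++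
                    PySem.Str.slice s (some 4) (some (PySem.Str.find s "(")) ++ " functionality.",
                  mi ++ "    \"\"\""]
        else out
      pvB_go rest inClass ci out
    else pvB_go rest inClass ci (out ++ [l])
  termination_by ls.length
  decreasing_by
    all_goals simp only [List.length_cons]
    all_goals first
      | omega
      | exact Nat.lt_succ_of_le (pvB_doc_len rest ci _)

def fix_class_docstring_alt (content : String) : String :=
  PySem.Str.join "\n" (pvB_go (((PySem.Str.split? content "\n").getD [])) false "" [])

-- ===== PRECONDITION & SPEC =====
-- Closed-form syntactic condition on the TEXT, not a run of either algorithm: it scans the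
-- quoting structure line by line — exactly how a reader decides whether a given line sits inside
-- an open triple-quoted block — carrying only two booleans (a class header has been seen; a
-- class docstring is open) and computing no output. It is true unless some line is a
-- class header inside an open docstring, or a class-level method-definition line without an
-- opening parenthesis whose following line is not a docstring opener.
def pvOk (ls : List String) (inClass : Bool) (inDoc : Bool) : Bool :=
  match ls with
  | [] => true
  | l :: rest =>
    let s := PySem.Str.strip l
    if PySem.Str.startswith s "class " && PySem.Str.endswith s ":" then
      !inDoc && pvOk rest true false
    else if inDoc then
      if PySem.Str.endswith s "\"\"\"" then pvOk rest inClass false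
      else pvOk rest inClass true
    else if inClass && PySem.Str.startswith s "\"\"\"" then
      if s ≠ "\"\"\"" && PySem.Str.endswith s "\"\"\"" then pvOk rest inClass false
      else pvOk rest inClass true
    else if inClass && PySem.Str.startswith s "def " then
      (PySem.Str.startswith (PySem.Str.strip (rest.headD "")) "\"\"\"" || s.toList.contains '(')
        && pvOk rest inClass false
    else pvOk rest inClass false

-- Pre_ excludes (a) inputs where a 'class ...:' line occurs inside an open class docstring —
-- A restarts class handling mid-docstring while B keeps it as docstring text, both defensible
-- readings of that ambiguous corner — and (b) inputs where a class-level method-definition line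
-- (not followed by a docstring opener) lacks an opening parenthesis, on which both Pythons raise
-- ValueError.
def Pre_fix_class_docstring (content : String) : Prop :=
  pvOk ((PySem.Str.split? content "\n").getD []) false false = true
instance (content : String) : Decidable (Pre_fix_class_docstring content) := by
  unfold Pre_fix_class_docstring; infer_instance

def pvWitness_fix_class_docstring : String := "class A:\n    x = 1"

def Spec_fix_class_docstring (content : String) (out : String) : Prop :=
  out = fix_class_docstring_alt content
instance (content : String) (out : String) : Decidable (Spec_fix_class_docstring content out) := by
  unfold Spec_fix_class_docstring; infer_instance

-- ===== CLAIM (what is proved, stated in full; the proofs are below) =====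
def Claim_equal_fix_class_docstring : Prop :=
  ∀ (content : String), Dom_fix_class_docstring content → Pre_fix_class_docstring content →
    Spec_fix_class_docstring content (fix_class_docstring content)

-- ===== LEMMAS AND PROOFS =====

-- A in docstring mode (no class line ahead inside the block) = B's inner loop,
-- then A outside docstring mode
theorem pvA_doc_eq (ls : List String) (ci : String) (acc : List String)
    (h : pvOk ls true true = true) :
    pvA_go ls true ci true acc =
      pvA_go (pvB_doc ls ci acc).1 true ci false (pvB_doc ls ci acc).2 := by
  induction ls generalizing acc with
  | nil => simp [pvA_go, pvB_doc]
  | cons l rest ih =>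
    by_cases hc : (PySem.Chars.startswith (PySem.Chars.strip l.toList) ['c','l','a','s','s',' '] = true
        ∧ PySem.Chars.endswith (PySem.Chars.strip l.toList) [':'] = true)
    · exfalso
      simp [pvOk, hc] at h
    · by_cases hend : PySem.Chars.endswith (PySem.Chars.strip l.toList) ['\"','\"','\"'] = true
      · simp [pvA_go, pvB_doc, hc, hend]
      · have h' : pvOk rest true true = true := by
          simp [pvOk, hc, hend] at h; exact h
        by_cases hne : PySem.Str.strip l = ""
        · simp [pvA_go, pvB_doc, hne, ih _ h', PySem.Chars.startswith, PySem.Chars.endswith]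
        · simp [pvA_go, pvB_doc, hc, hend, hne, ih _ h']

-- B's inner loop leaves a still-admissible tail
theorem pvOk_doc (ls : List String) (ci : String) (acc : List String)
    (h : pvOk ls true true = true) :
    pvOk (pvB_doc ls ci acc).1 true false = true := by
  induction ls generalizing acc with
  | nil => simp [pvB_doc, pvOk]
  | cons l rest ih =>
    by_cases hc : (PySem.Chars.startswith (PySem.Chars.strip l.toList) ['c','l','a','s','s',' '] = true
        ∧ PySem.Chars.endswith (PySem.Chars.strip l.toList) [':'] = true)
    · exfalso; simp [pvOk, hc] at h
    · by_cases hend : PySem.Chars.endswith (PySem.Chars.strip l.toList) ['\"','\"','\"'] = true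
      · have h' : pvOk rest true false = true := by
          simp [pvOk, hc, hend] at h; exact h
        simpa [pvB_doc, hend] using h'
      · have h' : pvOk rest true true = true := by
          simp [pvOk, hc, hend] at h; exact h
        by_cases hne : PySem.Str.strip l = ""
        · simpa [pvB_doc, hne, PySem.Chars.endswith] using ih _ h'
        · simpa [pvB_doc, hc, hend, hne] using ih _ h'

-- A without the docstring flag = B's outer loop (strong induction on the line count)
theorem pvA_eq_pvB (n : Nat) (ls : List String) (inClass : Bool) (ci : String)
    (acc : List String) (hn : ls.length ≤ n) (h : pvOk ls inClass false = true) :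
    pvA_go ls inClass ci false acc = pvB_go ls inClass ci acc := by
  induction n generalizing ls inClass ci acc with
  | zero =>
    have : ls = [] := List.eq_nil_of_length_eq_zero (Nat.le_zero.mp hn)
    subst this; simp [pvA_go, pvB_go]
  | succ n ih =>
    match ls with
    | [] => simp [pvA_go, pvB_go]
    | l :: rest =>
      have hr : rest.length ≤ n := by
        simpa using Nat.lt_succ_iff.mp (lt_of_lt_of_le (by simp) hn)
      by_cases hc : (PySem.Chars.startswith (PySem.Chars.strip l.toList) ['c','l','a','s','s',' '] = true
          ∧ PySem.Chars.endswith (PySem.Chars.strip l.toList) [':'] = true)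
      · have h' : pvOk rest true false = true := by
          simp [pvOk, hc] at h; exact h
        by_cases hnxt : PySem.Chars.startswith (PySem.Chars.strip (rest.head?.getD "").toList) ['\"','\"','\"'] = false
        · simp [pvA_go, pvB_go, hc, hnxt]
          exact ih rest true _ _ hr h'
        · simp [pvA_go, pvB_go, hc, hnxt]
          exact ih rest true _ _ hr h'
      · by_cases hq : (inClass = true ∧
            PySem.Chars.startswith (PySem.Chars.strip l.toList) ['\"','\"','\"'] = true)
        · obtain ⟨hic, hq2⟩ := hq
          subst hic
          by_cases hne : PySem.Str.strip l = "\"\"\""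
          · -- opener is exactly the three quotes: B consumes the block
            have h' : pvOk rest true true = true := by
              simp [pvOk, hne, PySem.Chars.startswith, PySem.Chars.endswith] at h; exact h
            simp [pvA_go, pvB_go, hne, PySem.Chars.startswith, PySem.Chars.endswith]
            rw [pvA_doc_eq _ _ _ h']
            exact ih _ _ _ _ (le_trans (pvB_doc_len rest ci _) hr) (pvOk_doc _ _ _ h')
          · by_cases hend : PySem.Chars.endswith (PySem.Chars.strip l.toList) ['\"','\"','\"'] = true
            · -- single-line docstring
              have h' : pvOk rest true false = true := by
                simp [pvOk, hc, hq2, hne, hend] at h; exact h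
              simp [pvA_go, pvB_go, hc, hq2, hne, hend]
              exact ih rest true _ _ hr h'
            · -- multi-line docstring: B's inner loop
              have h' : pvOk rest true true = true := by
                simp [pvOk, hc, hq2, hne, hend] at h; exact h
              simp [pvA_go, pvB_go, hc, hq2, hne, hend]
              rw [pvA_doc_eq _ _ _ h']
              exact ih _ _ _ _ (le_trans (pvB_doc_len rest ci _) hr) (pvOk_doc _ _ _ h')
        · by_cases hd : (inClass = true ∧
              PySem.Chars.startswith (PySem.Chars.strip l.toList) ['d','e','f',' '] = true)
          · obtain ⟨hic, hdef⟩ := hd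
            subst hic
            have hq' : ¬ PySem.Chars.startswith (PySem.Chars.strip l.toList) ['\"','\"','\"'] = true :=
              fun hx => hq ⟨rfl, hx⟩
            have h' : pvOk rest true false = true := by
              simp [pvOk, hc, hq', hdef] at h; exact h.2
            by_cases hnxt : PySem.Chars.startswith (PySem.Chars.strip (rest.head?.getD "").toList) ['\"','\"','\"'] = false
            · simp [pvA_go, pvB_go, hc, hq', hdef, hnxt]
              exact ih rest true _ _ hr h'
            · simp [pvA_go, pvB_go, hc, hq', hdef, hnxt]
              exact ih rest true _ _ hr h'
          · cases inClass with
            | false =>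
              have h' : pvOk rest false false = true := by
                simp [pvOk, hc] at h; exact h
              simp [pvA_go, pvB_go, hc]
              exact ih rest false _ _ hr h'
            | true =>
              have hq' : ¬ PySem.Chars.startswith (PySem.Chars.strip l.toList) ['\"','\"','\"'] = true :=
                fun hx => hq ⟨rfl, hx⟩
              have hd' : ¬ PySem.Chars.startswith (PySem.Chars.strip l.toList) ['d','e','f',' '] = true :=
                fun hx => hd ⟨rfl, hx⟩
              have h' : pvOk rest true false = true := by
                simp [pvOk, hc, hq', hd'] at h; exact h
              simp [pvA_go, pvB_go, hc, hq', hd']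
              exact ih rest true _ _ hr h'

-- ===== VERDICT (by name: the statement is the Claim_ definition above) =====
theorem fix_class_docstring_spec : Claim_equal_fix_class_docstring := by
  intro content _ hpre
  unfold Spec_fix_class_docstring fix_class_docstring fix_class_docstring_alt
  rw [pvA_eq_pvB (((PySem.Str.split? content "\n").getD [])).length _ _ _ _ le_rfl hpre]
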